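-- pv_equiv track=rewrite | github.com/BWSI-RACECAR/code-clash-18-unshrawal | manacost.py | mana_cost
-- ===== SOURCE A (Python) =====
-- def mana_cost(pool, cost):
--     # type pool: string
--     # type cost: string
--     # return: bool
--     x = len(pool)
--     for i in cost:
--         if i in pool:
--             pool = pool.replace(i, '', 1)
--             cost = cost.replace(i, '', 1)
--             x-=1
--     if len(cost) == 0:
--         return True
--     if cost.isdigit():
--         return int(cost) <= x
--     # TODO: Write code below to return a bool with the solution to the prompt
--     pass
-- ===== SOURCE B (Python) =====
-- def mana_cost(pool, cost):
--     # Staged per-distinct-character removal: count pool once, then strip the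
--     # matched copies of each distinct cost character in one replace call each;
--     # the generic budget x falls out of length arithmetic.
--     avail = {}
--     for ch in pool:
--         avail[ch] = avail.get(ch, 0) + 1
--     leftover = cost
--     for c in dict.fromkeys(cost):
--         leftover = leftover.replace(c, '', min(avail.get(c, 0), cost.count(c)))
--     if leftover == '':
--         return True
--     if leftover.isdigit():
--         x = len(pool) - len(cost) + len(leftover)
--         return int(leftover) <= x
-- ===== Notes on version B (the rewrite author's own statement) =====
-- stated objective: faster
-- what changed: Instead of A's per-character loop over cost that tests membership and rebuilds both strings each step, B builds a frequency table of pool once, then loops over the DISTINCT characters of cost removing all matched copies of each with a single counted replace, and recovers the generic budget x by length arithmetic (len(pool)-len(cost)+len(leftover)) instead of decrementing it.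
import Mathlib
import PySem

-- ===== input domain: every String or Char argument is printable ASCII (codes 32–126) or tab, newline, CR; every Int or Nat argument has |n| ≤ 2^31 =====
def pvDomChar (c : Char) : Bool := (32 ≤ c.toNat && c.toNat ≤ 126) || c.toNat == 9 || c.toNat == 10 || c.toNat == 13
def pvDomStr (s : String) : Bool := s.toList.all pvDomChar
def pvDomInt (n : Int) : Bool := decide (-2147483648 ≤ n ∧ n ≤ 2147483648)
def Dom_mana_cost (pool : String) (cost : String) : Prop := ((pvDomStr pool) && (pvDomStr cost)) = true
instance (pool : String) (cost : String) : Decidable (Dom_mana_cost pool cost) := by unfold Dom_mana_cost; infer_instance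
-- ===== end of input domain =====

-- B replaces A's per-character consume loop with one counted replace per DISTINCT
-- cost character and length arithmetic for x (measured in a timing run; return
-- value only, neither version mutates its arguments).

-- ===== PORT A =====
-- A's loop: `for i in cost` iterates the ORIGINAL cost string while `pool`/`cost`/`x`
-- are rebound; state is (pool, cost, x).  `i in pool` for the single char i is list
-- membership (exact), and s.replace(i, '', 1) for a single char i is List.erase
-- (removes the first occurrence, no-op if absent — exact).
def manaLoopA : List Char → List Char → List Char → Int → (List Char × List Char × Int)
  | [], pool, cost, x => (pool, cost, x)
  | i :: is, pool, cost, x =>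
    if pool.contains i then manaLoopA is (pool.erase i) (cost.erase i) (x - 1)
    else manaLoopA is pool cost x

def mana_cost (pool : String) (cost : String) : Option Bool :=
  let r := manaLoopA cost.toList pool.toList cost.toList (pool.toList.length : Int)
  let cost' := r.2.1
  let x := r.2.2
  if cost'.length = 0 then some true
  else if PySem.Chars.strIsdigit cost' then
    -- int(cost) cannot raise here: cost is a nonempty digit string
    some (decide ((PySem.Int.ofChars? cost').getD 0 ≤ x))
  else none

-- ===== PORT B =====
-- Source B: avail = counter of pool (dict built by get/insert); `dict.fromkeys(cost)`
-- iterates the distinct chars of cost in first-occurrence order = PySem.List.dedup;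
-- leftover.replace(c, '', k) for a single char c removes the first k occurrences
-- of c — ported step for step as eraseN (exact).
def eraseN : List Char → Char → Nat → List Char
  | [], _, _ => []
  | d :: t, c, k =>
    if k = 0 then d :: t
    else if d = c then eraseN t c (k - 1)
    else d :: eraseN t c k

def mana_cost_alt (pool : String) (cost : String) : Option Bool :=
  let avail := pool.toList.foldl (fun d ch => d.insert ch (d.getD ch 0 + 1)) PySem.Dict.empty
  let cs := cost.toList
  let leftover := (PySem.List.dedup cs).foldl
    (fun s c => eraseN s c (min (avail.getD c 0) ((cs.count c : Int))).toNat) cs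
  if leftover.length = 0 then some true
  else if PySem.Chars.strIsdigit leftover then
    some (decide ((PySem.Int.ofChars? leftover).getD 0 ≤
      (pool.toList.length : Int) - (cs.length : Int) + (leftover.length : Int)))
  else none

-- ===== PRECONDITION & SPEC =====
def Spec_mana_cost (pool : String) (cost : String) (out : Option Bool) : Prop := out = mana_cost_alt pool cost
instance (pool : String) (cost : String) (out : Option Bool) : Decidable (Spec_mana_cost pool cost out) := by unfold Spec_mana_cost; infer_instance

-- ===== CLAIM (what is proved, stated in full; the proofs are below) =====
def Claim_equal_mana_cost : Prop := ∀ (pool : String) (cost : String), Dom_mana_cost pool cost → Spec_mana_cost pool cost (mana_cost pool cost)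

-- ===== LEMMAS AND PROOFS =====

-- Reference recursion for A's loop: processing cost against a pool list, returning
-- (remaining pool, unmatched cost chars in order).
def refLoop : List Char → List Char → (List Char × List Char)
  | [], pool => (pool, [])
  | c :: cs, pool =>
    if pool.contains c then (refLoop cs (pool.erase c))
    else ((refLoop cs pool).1, c :: (refLoop cs pool).2)

-- Canonical form both leftovers are proved equal to: drop, per character c, the
-- first f c occurrences of c.
def dropCnt : List Char → (Char → Nat) → List Char
  | [], _ => []
  | c :: cs, f =>
    if f c = 0 then c :: dropCnt cs f
    else dropCnt cs (fun d => if d = c then f c - 1 else f d)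

theorem manaLoopA_eq (cs : List Char) : ∀ (pool L : List Char) (x : Int),
    (∀ c ∈ L, ¬ pool.contains c) →
    manaLoopA cs pool (L ++ cs) x =
      ((refLoop cs pool).1, L ++ (refLoop cs pool).2,
        x - (pool.length : Int) + ((refLoop cs pool).1.length : Int)) := by
  induction cs with
  | nil => intro pool L x _; simp [manaLoopA, refLoop]
  | cons i is ih =>
    intro pool L x hL
    by_cases hi : pool.contains i
    · have hiL : i ∉ L := fun h => hL i h hi
      have hmem : i ∈ pool := by simpa using hi
      have herase : (L ++ i :: is).erase i = L ++ is := by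
        rw [List.erase_append_right _ hiL, List.erase_cons_head]
      have hL' : ∀ c ∈ L, ¬ (pool.erase i).contains c := by
        intro c hc hcont
        exact hL c hc (by simpa using List.mem_of_mem_erase (by simpa using hcont))
      have hlen : ((pool.erase i).length : Int) = (pool.length : Int) - 1 := by
        rw [List.length_erase_of_mem hmem]
        have : 1 ≤ pool.length := List.length_pos_of_mem hmem
        omega
      simp only [manaLoopA, refLoop, hi, if_pos, herase]
      rw [ih (pool.erase i) L (x - 1) hL']
      rw [hlen]; ring_nf
    · have hL' : ∀ c ∈ L ++ [i], ¬ pool.contains c := by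
        intro c hc
        rcases List.mem_append.mp hc with h | h
        · exact hL c h
        · simpa [List.mem_singleton.mp h] using hi
      simp only [manaLoopA, refLoop, hi]
      have : L ++ i :: is = (L ++ [i]) ++ is := by simp
      rw [this, ih pool (L ++ [i]) x hL']
      simp

-- A's leftover in canonical form.
theorem refLoop_snd (cs : List Char) : ∀ pool : List Char,
    (refLoop cs pool).2 = dropCnt cs (fun c => min (pool.count c) (cs.count c)) := by
  induction cs with
  | nil => intro pool; simp [refLoop, dropCnt]
  | cons c cs ih =>
    intro pool
    by_cases hc : pool.contains c
    · have hmem : c ∈ pool := by simpa using hc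
      have hpc : 1 ≤ pool.count c := List.count_pos_iff.mpr hmem
      have hne : ¬ (min (pool.count c) ((c :: cs).count c) = 0) := by
        simp [List.count_cons]; omega
      simp only [refLoop, hc, if_pos, dropCnt, hne, if_neg]
      rw [ih (pool.erase c)]
      congr 1
      funext d
      by_cases hdc : d = c
      · subst hdc
        rw [List.count_erase_self]
        simp [List.count_cons]
        omega
      · rw [List.count_erase_of_ne hdc]
        have hcd : ¬ c = d := fun h => hdc h.symm
        simp [List.count_cons, hcd, hdc]
    · have hz : pool.count c = 0 := by
        rw [List.count_eq_zero]
        intro h; exact hc (by simpa using h)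
      have h0 : min (pool.count c) ((c :: cs).count c) = 0 := by
        simp [hz]
      simp only [refLoop, hc, Bool.false_eq_true, if_false, dropCnt, h0, if_pos]
      rw [ih pool]
      congr 2
      funext d
      by_cases hdc : d = c
      · subst hdc; simp [hz]
      · have hcd : ¬ c = d := fun h => hdc h.symm
        simp [List.count_cons, hcd]

-- Length bookkeeping: matched = |cost| - |leftover| = |pool| - |remaining pool|.
theorem refLoop_len (cs : List Char) : ∀ pool : List Char,
    (refLoop cs pool).1.length + cs.length
      = pool.length + (refLoop cs pool).2.length := by
  induction cs with
  | nil => intro pool; simp [refLoop]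
  | cons c cs ih =>
    intro pool
    by_cases hc : pool.contains c
    · have hmem : c ∈ pool := by simpa using hc
      have h1 : 1 ≤ pool.length := List.length_pos_of_mem hmem
      simp only [refLoop, hc, if_pos, List.length_cons]
      have := ih (pool.erase c)
      rw [List.length_erase_of_mem hmem] at this
      omega
    · simp only [refLoop, hc, Bool.false_eq_true, if_false, List.length_cons]
      have := ih pool
      omega

theorem dropCnt_zero (s : List Char) : ∀ f : Char → Nat,
    (∀ c ∈ s, f c = 0) → dropCnt s f = s := by
  induction s with
  | nil => intro f _; simp [dropCnt]
  | cons c cs ih =>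
    intro f hf
    have hc : f c = 0 := hf c (by simp)
    simp only [dropCnt, hc, if_pos]
    rw [ih f (fun d hd => hf d (by simp [hd]))]

theorem dropCnt_comp (s : List Char) : ∀ f g : Char → Nat,
    (∀ c, f c = 0 ∨ g c = 0) →
    dropCnt (dropCnt s f) g = dropCnt s (fun c => f c + g c) := by
  induction s with
  | nil => intro f g _; simp [dropCnt]
  | cons c cs ih =>
    intro f g hdisj
    by_cases hf : f c = 0
    · by_cases hg : g c = 0
      · have : f c + g c = 0 := by omega
        simp only [dropCnt, hf, hg, this, if_pos]
        rw [ih f g hdisj]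
      · simp only [dropCnt, hf, if_pos, Nat.zero_add, hg, if_neg, not_false_iff]
        rw [ih f (fun d => if d = c then g c - 1 else g d) ?_]
        · congr 1
          funext d
          by_cases hdc : d = c
          · subst hdc; simp [hf]
          · simp [hdc]
        · intro d
          by_cases hdc : d = c
          · subst hdc; left; exact hf
          · simpa [hdc] using hdisj d
    · have hg : g c = 0 := (hdisj c).resolve_left hf
      have hsum : ¬ (f c + g c = 0) := by omega
      simp only [dropCnt, hf, hsum, if_neg, not_false_iff]
      rw [ih (fun d => if d = c then f c - 1 else f d) g ?_]
      · congr 1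
        funext d
        by_cases hdc : d = c
        · subst hdc; simp only [if_pos rfl, hg, Nat.add_zero]
        · simp [hdc]
      · intro d
        by_cases hdc : d = c
        · subst hdc; simp [hg]
        · simpa [hdc] using hdisj d

-- Python's leftover.replace(c, '', k) in canonical form.
theorem eraseN_eq (s : List Char) : ∀ (c : Char) (k : Nat),
    eraseN s c k = dropCnt s (fun d => if d = c then k else 0) := by
  induction s with
  | nil => intro c k; simp [eraseN, dropCnt]
  | cons d t ih =>
    intro c k
    by_cases hk : k = 0
    · subst hk
      have : ∀ e ∈ d :: t, (fun d' => if d' = c then 0 else 0) e = 0 := by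
        intro e _; simp
      rw [dropCnt_zero (d :: t) _ this]
      simp [eraseN]
    · by_cases hdc : d = c
      · subst hdc
        simp only [eraseN, hk, if_neg, not_false_iff, if_pos]
        rw [ih d (k - 1)]
        simp only [dropCnt, if_pos, hk, if_neg, not_false_iff]
        congr 1
        funext e
        by_cases he : e = d <;> simp [he]
      · simp only [eraseN, hk, hdc, if_neg, not_false_iff, dropCnt, if_pos]
        rw [ih c k]

-- Folding counted per-character erases over a duplicate-free char list.
theorem fold_eraseN (cs : List Char) (k : Char → Nat) : ∀ (ds : List Char) (F : Char → Nat),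
    ds.Nodup → (∀ c ∈ ds, F c = 0) →
    List.foldl (fun s c => eraseN s c (k c)) (dropCnt cs F) ds
      = dropCnt cs (fun d => F d + if d ∈ ds then k d else 0) := by
  intro ds
  induction ds with
  | nil => intro F _ _; simp
  | cons c ds ih =>
    intro F hnd hF
    have hFc : F c = 0 := hF c (by simp)
    simp only [List.foldl_cons]
    rw [eraseN_eq, dropCnt_comp cs F _ ?_]
    · rw [ih (fun d => F d + if d = c then k c else 0) (List.nodup_cons.mp hnd).2 ?_]
      · congr 1
        funext d
        by_cases hdc : d = c
        · subst hdc
          have : d ∉ ds := (List.nodup_cons.mp hnd).1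
          simp [this, hFc]
        · simp [hdc]
      · intro d hd
        have hdc : d ≠ c := fun h => (List.nodup_cons.mp hnd).1 (h ▸ hd)
        simp [hdc, hF d (by simp [hd])]
    · intro d
      by_cases hdc : d = c
      · subst hdc; left; exact hFc
      · right; simp [hdc]

-- ===== VERDICT (by name: the statement is the Claim_ definition above) =====
theorem mana_cost_spec : Claim_equal_mana_cost := by
  intro pool cost _
  unfold Spec_mana_cost
  have hDict : ∀ c, (pool.toList.foldl
      (fun d ch => d.insert ch (d.getD ch 0 + 1)) PySem.Dict.empty).getD c 0
      = (pool.toList.count c : Int) := by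
    intro c
    rw [PySem.Dict.getD_foldl_insert_add_one]
    simp [PySem.Dict.empty, PySem.Dict.getD, PySem.Dict.get?]
  have hA := manaLoopA_eq cost.toList pool.toList [] (pool.toList.length : Int)
      (by intro c hc; cases hc)
  simp only [List.nil_append] at hA
  -- B's leftover equals A's leftover
  have hB : (PySem.List.dedup cost.toList).foldl
      (fun s c => eraseN s c (min ((pool.toList.foldl
        (fun d ch => d.insert ch (d.getD ch 0 + 1)) PySem.Dict.empty).getD c 0)
        ((cost.toList.count c : Int))).toNat) cost.toList
      = (refLoop cost.toList pool.toList).2 := by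
    have h := fold_eraseN cost.toList
        (fun c => (min ((pool.toList.foldl
          (fun d ch => d.insert ch (d.getD ch 0 + 1)) PySem.Dict.empty).getD c 0)
          ((cost.toList.count c : Int))).toNat)
        (PySem.List.dedup cost.toList) (fun _ => 0)
        (PySem.List.nodup_dedup _) (fun c _ => rfl)
    rw [dropCnt_zero cost.toList _ (fun c _ => rfl)] at h
    rw [h, refLoop_snd]
    congr 1
    funext d
    simp only [Nat.zero_add]
    by_cases hd : d ∈ cost.toList
    · rw [if_pos (by rwa [PySem.List.mem_dedup]), hDict d]
      omega
    · rw [if_neg (by rwa [PySem.List.mem_dedup])]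
      have : cost.toList.count d = 0 := List.count_eq_zero.mpr hd
      simp [this]
  -- x: A's running count equals B's length arithmetic
  have hx : (((refLoop cost.toList pool.toList).1.length : Int))
      = (pool.toList.length : Int) - (cost.toList.length : Int)
        + (((refLoop cost.toList pool.toList).2.length : Int)) := by
    have := refLoop_len cost.toList pool.toList
    omega
  simp only [mana_cost, mana_cost_alt, hA, hB, sub_self, zero_add, hx]
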